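-- pv_equiv track=rewrite | github.com/rec/recs | recs/ui/legal_filename.py | legal_filename
-- ===== SOURCE A (Python) =====
-- import string
--
-- CHARS = (string.ascii_letters + string.digits + '-_=,. ').encode()
--
-- def legal_filename(s):
--     """Encode any string so it is safe for filenames"""
--
--     def enc(i):
--         if i in CHARS:
--             return chr(i)
--         if i < 0x100:
--             return f'%{i:02x}'
--         return f'%u{i:04x}'
--
--     return ''.join(enc(i) for i in s.encode())
-- ===== SOURCE B (Python) =====
-- import string
--
-- CHARS = (string.ascii_letters + string.digits + '-_=,. ').encode()
--
-- def legal_filename(s):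
--     """Encode any string so it is safe for filenames"""
--     b = s.encode()
--     parts = []
--     i, n = 0, len(b)
--     while i < n:
--         j = i
--         while j < n and b[j] in CHARS:
--             j += 1
--         parts.append(b[i:j].decode())          # maximal run of safe bytes, copied verbatim
--         if j < n:
--             parts.append('%%%02x' % b[j])      # one unsafe byte, escaped
--             j += 1
--         i = j
--     return ''.join(parts)
-- ===== Notes on version B (the rewrite author's own statement) =====
-- stated objective: alternative
-- what changed: B scans the encoded bytes in maximal runs of safe bytes, appending each whole run verbatim (one bulk decode per run) and escaping only the single unsafe byte between runs, instead of A's per-byte three-way conditional mapping joined over every byte.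
import Mathlib
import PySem

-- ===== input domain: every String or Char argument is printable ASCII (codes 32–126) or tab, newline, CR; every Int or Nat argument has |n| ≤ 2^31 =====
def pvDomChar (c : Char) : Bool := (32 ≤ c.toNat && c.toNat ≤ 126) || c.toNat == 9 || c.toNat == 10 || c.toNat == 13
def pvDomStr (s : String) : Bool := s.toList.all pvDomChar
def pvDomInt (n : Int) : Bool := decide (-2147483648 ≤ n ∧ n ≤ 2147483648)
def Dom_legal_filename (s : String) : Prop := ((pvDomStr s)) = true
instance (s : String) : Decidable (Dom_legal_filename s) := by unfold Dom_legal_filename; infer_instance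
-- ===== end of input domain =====

-- B scans the bytes in maximal runs of safe bytes copied verbatim, escaping only the byte between runs,
-- instead of A's per-byte conditional mapping; an alternative decomposition, same output.
-- On Dom (ASCII incl. tab/newline/CR) s.encode() is exactly the list of code points, ported as s.toList.map Char.toNat.

-- shared module constant CHARS = (ascii_letters + digits + '-_=,. ').encode(), as the list of byte values
def pvCHARS : List Nat :=
  "abcdefghijklmnopqrstuvwxyzABCDEFGHIJKLMNOPQRSTUVWXYZ0123456789-_=,. ".toList.map Char.toNat

-- lowercase hex digit and the '%02x' / '%04x' formattings (exact for the widths the code uses)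
def pvHexDigit (n : Nat) : Char := if n < 10 then Char.ofNat (48 + n) else Char.ofNat (87 + n)
def pvHex2 (i : Nat) : List Char := [pvHexDigit (i / 16), pvHexDigit (i % 16)]
def pvHex4 (i : Nat) : List Char :=
  [pvHexDigit (i / 4096 % 16), pvHexDigit (i / 256 % 16), pvHexDigit (i / 16 % 16), pvHexDigit (i % 16)]

-- ===== PORT A =====
-- enc(i): the source's own three branches, in order ('if i < 0x100' is A's literal second test)
def pvEnc (i : Nat) : List Char :=
  if i ∈ pvCHARS then [Char.ofNat i]
  else if i < 0x100 then '%' :: pvHex2 i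
  else '%' :: 'u' :: pvHex4 i

def legal_filename (s : String) : String :=
  String.mk ((s.toList.map Char.toNat).flatMap pvEnc)

-- ===== PORT B =====
-- B's outer while loop over the remaining bytes: the inner `while b[j] in CHARS` is the takeWhile,
-- the run is appended verbatim, then one escaped byte (if any), then the loop continues on the rest.
def pvAltGo (l : List Nat) : List Char :=
  match h : l.dropWhile (fun i => decide (i ∈ pvCHARS)) with
  | [] => l.map Char.ofNat
  | x :: xs =>
      ((l.takeWhile (fun i => decide (i ∈ pvCHARS))).map Char.ofNat)
        ++ ('%' :: pvHex2 x) ++ pvAltGo xs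
termination_by l.length
decreasing_by
  have h1 := List.takeWhile_append_dropWhile (p := fun i => decide (i ∈ pvCHARS)) (l := l)
  have h2 := congrArg List.length h1
  rw [h] at h2
  simp at h2
  omega

def legal_filename_alt (s : String) : String :=
  String.mk (pvAltGo (s.toList.map Char.toNat))

-- ===== PRECONDITION & SPEC =====
def Spec_legal_filename (s : String) (out : String) : Prop := out = legal_filename_alt s
instance (s : String) (out : String) : Decidable (Spec_legal_filename s out) := by unfold Spec_legal_filename; infer_instance

-- ===== CLAIM =====
def Claim_equal_legal_filename : Prop := ∀ (s : String), Dom_legal_filename s → Spec_legal_filename s (legal_filename s)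

-- ===== LEMMAS AND PROOFS =====
theorem pvFlatMap_safe (l : List Nat) (hall : ∀ i ∈ l, i ∈ pvCHARS) :
    l.flatMap pvEnc = l.map Char.ofNat := by
  induction l with
  | nil => simp
  | cons a as iha =>
    simp only [List.flatMap_cons, List.map_cons]
    rw [pvEnc, if_pos (hall a (by simp))]
    simp only [List.singleton_append]
    congr 1
    exact iha (fun i hi => hall i (List.mem_cons_of_mem _ hi))

theorem pvAltGo_eq (l : List Nat) (hlt : ∀ i ∈ l, i < 256) : pvAltGo l = l.flatMap pvEnc := by
  have main : ∀ n, ∀ l : List Nat, l.length ≤ n → (∀ i ∈ l, i < 256) → pvAltGo l = l.flatMap pvEnc := by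
    intro n
    induction n with
    | zero =>
      intro l hn _
      have : l = [] := List.eq_nil_of_length_eq_zero (Nat.le_zero.mp hn)
      subst this
      rw [pvAltGo]; simp
    | succ n ih =>
      intro l hn hlt
      rw [pvAltGo]
      split
      · rename_i h
        have hall : ∀ i ∈ l, i ∈ pvCHARS := by
          intro i hi
          have := List.dropWhile_eq_nil_iff.mp h i hi
          simpa using this
        exact (pvFlatMap_safe l hall).symm
      · rename_i x xs h
        have hsplit : l = l.takeWhile (fun i => decide (i ∈ pvCHARS)) ++ x :: xs := by
          conv_lhs => rw [← List.takeWhile_append_dropWhile (p := fun i => decide (i ∈ pvCHARS)) (l := l)]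
          rw [h]
        have hxmem : x ∈ l := hsplit ▸ (by simp)
        have hxnot : x ∉ pvCHARS := by
          have hne : l.dropWhile (fun i => decide (i ∈ pvCHARS)) ≠ [] := by rw [h]; simp
          have := List.head_dropWhile_not (p := fun i => decide (i ∈ pvCHARS)) (l := l) hne
          simp only [h, List.head_cons] at this
          simpa using this
        have htw : ∀ i ∈ l.takeWhile (fun i => decide (i ∈ pvCHARS)), i ∈ pvCHARS := by
          intro i hi
          have := List.mem_takeWhile_imp hi
          simpa using this
        have hxs : ∀ i ∈ xs, i < 256 := by
          intro i hi
          exact hlt i (hsplit ▸ (by simp [hi]))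
        have hlen : xs.length ≤ n := by
          have := congrArg List.length hsplit
          simp at this
          omega
        rw [ih xs hlen hxs]
        conv_rhs => rw [hsplit]
        rw [List.flatMap_append, List.flatMap_cons]
        rw [pvFlatMap_safe _ htw, pvEnc, if_neg hxnot, if_pos (hlt x hxmem)]
        simp
  exact main l.length l (le_refl _) hlt

-- ===== VERDICT =====
theorem legal_filename_spec : Claim_equal_legal_filename := by
  intro s hdom
  unfold Spec_legal_filename legal_filename legal_filename_alt
  congr 1
  refine (pvAltGo_eq _ ?_).symm
  intro i hi
  obtain ⟨c, hc, rfl⟩ := List.mem_map.mp hi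
  have hb : pvDomChar c = true := List.all_eq_true.mp hdom c hc
  simp [pvDomChar] at hb
  omega
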